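-- pv_equiv track=rewrite | github.com/klekot/YaP | notUsed/keywords/modules/site_position.py | site_position
-- ===== SOURCE A (Python) =====
-- def site_position(result_html, rate_url):
--     result_arr = []
--     position = 0
--     for text in result_html:
--         result_arr.append(text)
--     result_arr = result_arr[1:len(result_arr) - 1]
--     result_string = "".join(result_arr)
--     sep_string = result_string.split('><')
--     rate_number = 0
--     for i, item in enumerate(sep_string):
--         if "b-link b-link_cropped_no serp-item__title-link" in item:
--             rate_number += 1
--             if rate_url in item:
--                 position = rate_number
--     return position
-- ===== SOURCE B (Python) =====
-- CLS = "b-link b-link_cropped_no serp-item__title-link"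
--
--
-- def site_position(result_html, rate_url):
--     segs = "".join(list(result_html)[1:-1]).split('><')
--     for k in range(len(segs) - 1, -1, -1):
--         if CLS in segs[k] and rate_url in segs[k]:
--             return sum(1 for s in segs[:k + 1] if CLS in s)
--     return 0
-- ===== Notes on version B (the rewrite author's own statement) =====
-- stated objective: alternative
-- what changed: Replaces A's single fused forward pass (counting class links while updating the remembered position on every URL hit) with two separate passes: a backward scan that locates the last segment containing both the class string and the URL, then a count of class-containing segments up to that index.
import Mathlib
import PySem

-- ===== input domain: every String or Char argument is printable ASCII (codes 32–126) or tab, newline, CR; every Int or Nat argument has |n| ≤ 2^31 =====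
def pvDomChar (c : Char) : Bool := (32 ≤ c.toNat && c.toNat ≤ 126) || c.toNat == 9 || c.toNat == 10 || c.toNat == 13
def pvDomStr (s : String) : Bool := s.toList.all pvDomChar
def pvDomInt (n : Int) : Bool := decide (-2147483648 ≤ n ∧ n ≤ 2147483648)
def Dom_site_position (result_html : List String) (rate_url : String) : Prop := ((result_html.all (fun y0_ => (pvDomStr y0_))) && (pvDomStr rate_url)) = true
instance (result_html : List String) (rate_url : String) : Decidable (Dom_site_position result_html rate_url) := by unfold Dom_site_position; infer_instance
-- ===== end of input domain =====

-- B: instead of A's single fused forward pass, a backward scan finds the last matching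
-- segment and a second pass counts the class-containing segments up to it (alternative decomposition, same cost).

-- the class-marker literal both programs test for
def pvCls : String := "b-link b-link_cropped_no serp-item__title-link"

-- s.split(sep) for a NONEMPTY literal sep: PySem.Str.split? is none only for sep = "",
-- so the default is unreachable; exact for the '><' separator both programs use
def pySplit (s sep : String) : List String := (PySem.Str.split? s sep).getD []

-- ===== PORT A =====
def site_position (result_html : List String) (rate_url : String) : Int :=
  let result_arr : List String := result_html.foldl (fun acc text => acc ++ [text]) []
  let result_arr := PySem.List.slice result_arr (some 1) (some ((result_arr.length : Int) - 1))
  let result_string := PySem.Str.join "" result_arr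
  let sep_string := pySplit result_string "><"
  let st := sep_string.foldl (fun (st : Int × Int) item =>
      if PySem.Str.isIn pvCls item then
        if PySem.Str.isIn rate_url item then (st.2 + 1, st.2 + 1)
        else (st.1, st.2 + 1)
      else st) (0, 0)
  st.1

-- ===== PORT B =====
-- backward scan (the 'for k in range(len(segs)-1, -1, -1)' loop): first hit from the
-- end of the list; 'rest.length' is exactly the original index k of the hit
def pvFindRev (rate_url : String) : List String → Option Nat
  | [] => none
  | s :: rest =>
    if PySem.Str.isIn pvCls s && PySem.Str.isIn rate_url s then some rest.length
    else pvFindRev rate_url rest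

def site_position_alt (result_html : List String) (rate_url : String) : Int :=
  let segs := pySplit (PySem.Str.join "" (PySem.List.slice result_html (some 1) (some (-1)))) "><"
  match pvFindRev rate_url segs.reverse with
  | none => 0
  | some k => ((segs.take (k + 1)).countP (fun s => PySem.Str.isIn pvCls s) : Int)

-- ===== PRECONDITION & SPEC =====
def Spec_site_position (result_html : List String) (rate_url : String) (out : Int) : Prop := out = site_position_alt result_html rate_url
instance (result_html : List String) (rate_url : String) (out : Int) : Decidable (Spec_site_position result_html rate_url out) := by unfold Spec_site_position; infer_instance

-- ===== CLAIM (what is proved, stated in full; the proofs are below) =====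
def Claim_equal_site_position : Prop := ∀ (result_html : List String) (rate_url : String), Dom_site_position result_html rate_url → Spec_site_position result_html rate_url (site_position result_html rate_url)

-- ===== LEMMAS AND PROOFS =====

-- front-recursive characterisation of "index of the last segment matching both"
def pvLastIdx (rate_url : String) : List String → Option Nat
  | [] => none
  | s :: rest =>
    match pvLastIdx rate_url rest with
    | some j => some (j + 1)
    | none => if PySem.Str.isIn pvCls s && PySem.Str.isIn rate_url s then some 0 else none

theorem pvFindRev_append (u s : String) (xs : List String) :
    pvFindRev u (xs ++ [s]) =
      match pvFindRev u xs with
      | some j => some (j + 1)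
      | none => if PySem.Str.isIn pvCls s && PySem.Str.isIn u s then some 0 else none := by
  induction xs with
  | nil => simp only [List.nil_append, pvFindRev, List.length_nil]
  | cons x xs ih =>
    simp only [List.cons_append, pvFindRev, ih, List.length_append, List.length_cons,
      List.length_nil]
    by_cases h : (PySem.Str.isIn pvCls x && PySem.Str.isIn u x) = true
    · simp only [h, reduceIte]
    · simp only [h, Bool.not_eq_true] at h ⊢
      simp only [h, Bool.false_eq_true, reduceIte]

theorem pvFindRev_reverse (u : String) (l : List String) :
    pvFindRev u l.reverse = pvLastIdx u l := by
  induction l with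
  | nil => rfl
  | cons s rest ih =>
    simp only [List.reverse_cons, pvFindRev_append, ih, pvLastIdx]

theorem pvFoldAppend (l : List String) (acc : List String) :
    l.foldl (fun a t => a ++ [t]) acc = acc ++ l := by
  induction l generalizing acc with
  | nil => simp
  | cons x xs ih => simp [ih]

theorem pvSliceEq (xs : List String) :
    PySem.List.slice xs (some 1) (some ((xs.length : Int) - 1)) =
      PySem.List.slice xs (some 1) (some (-1)) := by
  cases xs with
  | nil => rfl
  | cons x t =>
    have h : ((x :: t).length : Int) - 1 = ((t.length : Nat) : Int) := by
      simp
    rw [h]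
    simp only [PySem.List.slice, PySem.List.clampIdx]
    split_ifs <;> simp_all <;> omega

-- loop invariant of A's fused pass, stated against pvLastIdx
theorem pvFoldInv (u : String) (l : List String) (pos rn : Int) :
    l.foldl (fun (st : Int × Int) item =>
        if PySem.Str.isIn pvCls item then
          if PySem.Str.isIn u item then (st.2 + 1, st.2 + 1)
          else (st.1, st.2 + 1)
        else st) (pos, rn) =
      ((match pvLastIdx u l with
        | none => pos
        | some j => rn + ((l.take (j + 1)).countP (fun s => PySem.Str.isIn pvCls s) : Int)),
       rn + (l.countP (fun s => PySem.Str.isIn pvCls s) : Int)) := by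
  induction l generalizing pos rn with
  | nil => simp [pvLastIdx]
  | cons s rest ih =>
    simp only [List.foldl_cons]
    by_cases hp : PySem.Str.isIn pvCls s = true
    · by_cases hq : PySem.Str.isIn u s = true
      · simp only [hp, hq, reduceIte, ih, pvLastIdx, Bool.and_self, List.countP_cons,
          List.take_succ_cons, Prod.mk.injEq]
        cases hrest : pvLastIdx u rest with
        | none =>
          simp only [List.take_zero, List.countP_nil, List.countP_cons, hp, reduceIte]
          constructor <;> (norm_num; try ring)
        | some j =>
          simp only [List.take_succ_cons, List.countP_cons, hp, reduceIte]
          constructor <;> (norm_num; try ring)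
      · have hq' : PySem.Str.isIn u s = false := by simp only [Bool.not_eq_true] at hq; exact hq
        simp only [hp, hq', reduceIte, Bool.false_eq_true, ih, pvLastIdx, Bool.and_true,
          Bool.and_false, Prod.mk.injEq]
        cases hrest : pvLastIdx u rest with
        | none =>
          simp only [List.countP_cons, hp, reduceIte]
          constructor <;> (norm_num; try ring)
        | some j =>
          simp only [List.take_succ_cons, List.countP_cons, hp, reduceIte]
          constructor <;> (norm_num; try ring)
    · have hp' : PySem.Str.isIn pvCls s = false := by simp only [Bool.not_eq_true] at hp; exact hp
      simp only [hp', Bool.false_eq_true, reduceIte, Bool.false_and, ih, pvLastIdx,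
        Prod.mk.injEq]
      cases hrest : pvLastIdx u rest with
      | none =>
        simp only [List.countP_cons, hp', Bool.false_eq_true, reduceIte]
        constructor <;> (norm_num; try ring)
      | some j =>
        simp only [List.take_succ_cons, List.countP_cons, hp', Bool.false_eq_true, reduceIte]
        constructor <;> (norm_num; try ring)

-- ===== VERDICT (by name: the statement is the Claim_ definition above) =====
theorem site_position_spec : Claim_equal_site_position := by
  intro result_html rate_url _
  unfold Spec_site_position site_position site_position_alt
  simp only [pvFoldAppend, List.nil_append, pvSliceEq, pvFindRev_reverse, pvFoldInv]
  cases pvLastIdx rate_url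
      (pySplit (PySem.Str.join "" (PySem.List.slice result_html (some 1) (some (-1)))) "><") with
  | none => rfl
  | some j => exact zero_add _
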